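-- pv_equiv track=rewrite | github.com/woojerry/Algorithms | Others/11st/3.py | solution
-- ===== SOURCE A (Python) =====
-- def solution(A):
--     # write your code in Python 3.6
--     pass
--     dic = {}
--
--     for i in A:
--         dic[i] = dic.get(i, 0) + 1
--
--     answer = 0
--
--     for j in dic:
--         # if j == dict[j] 할거없음
--         if j != dic[j]:
--             if abs(j - dic[j]) < dic[j]:
--                 answer += abs(j - dic[j])
--             elif abs(j - dic[j]) >= dic[j]:
--                 answer += dic[j]
--
--     return answer
-- ===== SOURCE B (Python) =====
-- def solution(A):
--     s = sorted(A)
--     if not s: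
--         return 0
--     ans = 0
--     run_val = s[0]
--     run_len = 1
--     for x in s[1:]:
--         if x == run_val:
--             run_len += 1
--         else:
--             ans += min(abs(run_val - run_len), run_len)
--             run_val, run_len = x, 1
--     ans += min(abs(run_val - run_len), run_len)
--     return ans
-- ===== Notes on version B (the rewrite author's own statement) =====
-- stated objective: alternative
-- what changed: Replaces the hash-map frequency dict plus key iteration by sort-then-run-length grouping: one pass over sorted(A) accumulates min(abs(value-count), count) per run, which collapses A's two-branch (and implicit skip) logic into a single min.
import Mathlib
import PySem

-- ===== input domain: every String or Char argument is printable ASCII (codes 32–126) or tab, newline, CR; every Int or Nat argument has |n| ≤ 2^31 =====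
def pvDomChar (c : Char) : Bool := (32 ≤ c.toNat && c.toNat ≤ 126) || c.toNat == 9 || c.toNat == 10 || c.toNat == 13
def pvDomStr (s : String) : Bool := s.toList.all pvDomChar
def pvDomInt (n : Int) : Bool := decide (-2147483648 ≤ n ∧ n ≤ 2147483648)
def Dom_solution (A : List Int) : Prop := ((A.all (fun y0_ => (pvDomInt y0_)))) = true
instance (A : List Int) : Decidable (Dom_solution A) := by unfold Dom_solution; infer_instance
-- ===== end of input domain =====

-- B replaces A's frequency dict + key iteration by sort-then-run-length grouping with a single min per run (objective: alternative, same result).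

-- ===== PORT A =====
-- dict built by dic[i] = dic.get(i, 0) + 1; then 'for j in dic' iterates keys in insertion order;
-- dic[j] is total here (j is a key), ported as getD j 0.
def solution (A : List Int) : Int :=
  let dic := A.foldl (fun d i => d.insert i (d.getD i 0 + 1)) PySem.Dict.empty
  dic.keys.foldl (fun answer j =>
    if j ≠ dic.getD j 0 then
      if |j - dic.getD j 0| < dic.getD j 0 then answer + |j - dic.getD j 0|
      else if |j - dic.getD j 0| ≥ dic.getD j 0 then answer + dic.getD j 0
      else answer
    else answer) 0

-- ===== PORT B =====
-- the 'for x in s[1:]' loop of Source B, carrying (run_val, run_len, ans); the [] case is the final flush after the loop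
def altLoop (v c ans : Int) : List Int → Int
  | [] => ans + min |v - c| c
  | y :: ys => if y = v then altLoop v (c + 1) ans ys
               else altLoop y 1 (ans + min |v - c| c) ys

def solution_alt (A : List Int) : Int :=
  match PySem.List.sorted A (fun x => x) false with
  | [] => 0
  | x :: xs => altLoop x 1 0 xs

-- ===== PRECONDITION & SPEC =====
def Spec_solution (A : List Int) (out : Int) : Prop := out = solution_alt A
instance (A : List Int) (out : Int) : Decidable (Spec_solution A out) := by unfold Spec_solution; infer_instance

-- ===== CLAIM (what is proved, stated in full; the proofs are below) =====
def Claim_equal_solution : Prop := ∀ (A : List Int), Dom_solution A → Spec_solution A (solution A)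

-- ===== LEMMAS AND PROOFS =====

-- the per-value contribution both programs add
def contrib (v c : Int) : Int := min |v - c| c

-- A's three-way branch is exactly 'min' once the count is at least 1
lemma branch_eq_contrib (ans j c : Int) (hc : 1 ≤ c) :
    (if j ≠ c then
      if |j - c| < c then ans + |j - c|
      else if |j - c| ≥ c then ans + c
      else ans
    else ans) = ans + contrib j c := by
  unfold contrib
  rcases abs_cases (j - c) with ⟨h1, h2⟩ | ⟨h1, h2⟩ <;> rw [h1] <;> rw [min_def] <;> split_ifs <;> omega

-- A's value as a sum over the distinct values of A (first-occurrence order) of contrib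
lemma solution_eq_sum (A : List Int) :
    solution A = ((PySem.Set.ofList A).map (fun v => contrib v (A.count v))).sum := by
  unfold solution
  rw [PySem.Dict.foldl_insert_getD_add_one_eq_counter]
  simp only [PySem.Dict.keys_counter, PySem.Dict.getD_counter]
  rw [PySem.List.foldl_congr_mem _ _ (fun ans j => ans + contrib j (A.count j)) _ ?_]
  · rw [PySem.List.foldl_add]; simp
  · intro acc x hx
    have hxA : x ∈ A := (PySem.Set.mem_ofList _ _).mp hx
    exact branch_eq_contrib acc x _ (by exact_mod_cast List.one_le_count_iff.mpr hxA)

-- the run-length loop on a sorted tail, characterised: current run finishes with count c + (count in tail),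
-- then one contrib per remaining distinct value
lemma altLoop_sorted (ys : List Int) : ∀ (v c ans : Int), 1 ≤ c →
    (v :: ys).Pairwise (· ≤ ·) →
    altLoop v c ans ys = ans + contrib v (c + ys.count v)
      + (((PySem.Set.ofList ys).discard v).map (fun w => contrib w (ys.count w))).sum := by
  induction ys with
  | nil => intro v c ans _ _; simp [altLoop, PySem.Set.discard, contrib]
  | cons y t ih =>
    intro v c ans hc hp
    have hp' : (y :: t).Pairwise (· ≤ ·) := hp.tail
    have hvy : v ≤ y := (List.pairwise_cons.mp hp).1 y (by simp)
    by_cases hyv : y = v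
    · subst hyv
      rw [altLoop, if_pos rfl, ih y (c + 1) ans (by omega) hp']
      have hd : (PySem.Set.ofList (y :: t)).discard y = (PySem.Set.ofList t).discard y := by
        rw [PySem.Set.ofList_cons]
        simp [PySem.Set.discard, List.filter_filter]
      rw [hd]
      have hcnt : ((y :: t).count y : Int) = (t.count y : Int) + 1 := by
        rw [List.count_cons_self]; push_cast; ring
      rw [hcnt]
      have : ∀ w ∈ (PySem.Set.ofList t).discard y,
          contrib w ((y :: t).count w) = contrib w (t.count w) := by
        intro w hw
        have hwy : ¬ (w == y) := by
          have := List.of_mem_filter hw; simpa using this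
        rw [List.count_cons_of_ne (by simpa using (Ne.symm (by simpa using hwy)))]
      rw [List.map_congr_left this]
      ring_nf
    · rw [altLoop, if_neg hyv, ih y 1 (ans + min |v - c| c) (le_refl 1) hp']
      have hvy' : v < y := lt_of_le_of_ne hvy (fun h => hyv h.symm)
      have hvt : ∀ e ∈ t, v < e := by
        intro e he
        exact lt_of_lt_of_le hvy' ((List.pairwise_cons.mp hp').1 e he)
      have hcv : (y :: t).count v = 0 := by
        rw [List.count_eq_zero]
        intro hv
        rcases List.mem_cons.mp hv with h | h
        · exact hyv h.symm
        · exact absurd rfl (ne_of_gt (hvt v h))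
      have hd : (PySem.Set.ofList (y :: t)).discard v
          = y :: (PySem.Set.ofList t).discard y := by
        rw [PySem.Set.ofList_cons]
        simp only [PySem.Set.discard, List.filter_cons]
        have h1 : (!(y == v)) = true := by simp [hyv]
        rw [if_pos h1, List.filter_filter]
        congr 1
        apply List.filter_congr
        intro w hw
        have hwt : w ∈ t := (PySem.Set.mem_ofList _ _).mp hw
        have : w ≠ v := ne_of_gt (hvt w hwt)
        simp [this]
      rw [hd, hcv]
      simp only [List.map_cons, List.sum_cons, List.count_cons_self]
      have : ∀ w ∈ (PySem.Set.ofList t).discard y,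
          contrib w ((y :: t).count w) = contrib w (t.count w) := by
        intro w hw
        have hwy : ¬ (w == y) := by
          have := List.of_mem_filter hw; simpa using this
        rw [List.count_cons_of_ne (by simpa using (Ne.symm (by simpa using hwy)))]
      rw [List.map_congr_left this]
      unfold contrib
      push_cast
      ring_nf

-- B's value as the same sum, over the distinct values of sorted(A)
lemma solution_alt_eq_sum (A : List Int) :
    solution_alt A = ((PySem.Set.ofList (PySem.List.sorted A (fun x => x) false)).map
      (fun v => contrib v ((PySem.List.sorted A (fun x => x) false).count v))).sum := by
  unfold solution_alt
  cases hs : PySem.List.sorted A (fun x => x) false with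
  | nil => simp
  | cons x xs =>
    have hp : (x :: xs).Pairwise (· ≤ ·) := by
      have := PySem.List.sorted_pairwise A (fun x => x)
      rw [hs] at this; exact this
    have step : (match x :: xs with | [] => (0:Int) | a :: as => altLoop a 1 0 as)
        = altLoop x 1 0 xs := rfl
    rw [step, altLoop_sorted xs x 1 0 (le_refl 1) hp]
    rw [PySem.Set.ofList_cons]
    simp only [List.map_cons, List.sum_cons, List.count_cons_self, zero_add]
    have : ∀ w ∈ (PySem.Set.ofList xs).discard x,
        contrib w ((x :: xs).count w) = contrib w (xs.count w) := by
      intro w hw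
      have hwx : ¬ (w == x) := by
        have := List.of_mem_filter hw; simpa [PySem.Set.discard] using this
      rw [List.count_cons_of_ne (by simpa using (Ne.symm (by simpa using hwx)))]
    rw [List.map_congr_left this]
    push_cast
    ring_nf

-- the two sums range over lists of distinct values with equal membership, with counts invariant under the sort
lemma sums_eq (A : List Int) :
    ((PySem.Set.ofList A).map (fun v => contrib v (A.count v))).sum
      = ((PySem.Set.ofList (PySem.List.sorted A (fun x => x) false)).map
          (fun v => contrib v ((PySem.List.sorted A (fun x => x) false).count v))).sum := by
  set l := PySem.List.sorted A (fun x => x) false with hl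
  have hperm : l.Perm A := PySem.List.sorted_perm A (fun x => x) false
  have hsetperm : (PySem.Set.ofList A).Perm (PySem.Set.ofList l) := by
    rw [List.perm_ext_iff_of_nodup (PySem.Set.nodup_ofList _) (PySem.Set.nodup_ofList _)]
    intro a
    rw [PySem.Set.mem_ofList, PySem.Set.mem_ofList]
    exact (hperm.mem_iff).symm
  have hcnt : ∀ v : Int, l.count v = A.count v := fun v => hperm.count_eq v
  calc ((PySem.Set.ofList A).map (fun v => contrib v (A.count v))).sum
      = ((PySem.Set.ofList l).map (fun v => contrib v (A.count v))).sum :=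
        (hsetperm.map _).sum_eq
    _ = ((PySem.Set.ofList l).map (fun v => contrib v (l.count v))).sum := by
        apply congrArg
        apply List.map_congr_left
        intro w _
        rw [hcnt w]

-- ===== VERDICT (by name: the statement is the Claim_ definition above) =====
theorem solution_spec : Claim_equal_solution := by
  intro A _
  show solution A = solution_alt A
  rw [solution_eq_sum, solution_alt_eq_sum, sums_eq]
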